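-- pv_equiv track=rewrite | github.com/FantasyVR/AdventofCode | day2.py | checkif
-- ===== SOURCE A (Python) =====
-- def checkif(boxId):
--     m = 0
--     n = 0
--     dic = dict()
--     for index in range(0,len(boxId)):
--         if boxId[index] in dic:
--             dic[boxId[index]] += 1
--         else:
--             dic[boxId[index]] = 1
--
--     # 找到出现两次、三次的字符
--     for x in dic:
--         if(dic[x] == 2):
--             m = 1
--         elif(dic[x]==3):
--             n = 1
--     return [m,n]
-- ===== SOURCE B (Python) =====
-- def checkif(boxId):
--     # Sort the characters, then scan the sorted list run by run (recursing on the
--     # remainder after each run); a run of length 2 / 3 sets the corresponding flag.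
--     def scan(s):
--         if not s:
--             return 0, 0
--         run = 1
--         while run < len(s) and s[run] == s[0]:
--             run += 1
--         m, n = scan(s[run:])
--         return (1 if run == 2 else m, 1 if run == 3 else n)
--     m, n = scan(sorted(boxId))
--     return [m, n]
-- ===== Notes on version B (the rewrite author's own statement) =====
-- stated objective: alternative
-- what changed: Replaces the hash-map frequency table and the flag scan over its keys with a sort of the characters followed by a single run-length scan of the sorted list (recursing on the remainder after each maximal run), setting the flags when a run has length exactly 2 or 3.
import Mathlib
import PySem

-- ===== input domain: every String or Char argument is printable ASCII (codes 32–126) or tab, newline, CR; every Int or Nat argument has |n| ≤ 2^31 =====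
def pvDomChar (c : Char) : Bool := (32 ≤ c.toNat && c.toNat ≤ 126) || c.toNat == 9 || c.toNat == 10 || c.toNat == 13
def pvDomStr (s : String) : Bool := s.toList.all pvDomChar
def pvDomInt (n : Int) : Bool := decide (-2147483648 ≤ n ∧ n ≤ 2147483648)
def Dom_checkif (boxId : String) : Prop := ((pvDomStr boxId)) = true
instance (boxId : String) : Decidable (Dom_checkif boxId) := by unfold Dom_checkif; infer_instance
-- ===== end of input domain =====

-- B sorts the characters and scans the sorted list run by run instead of building a
-- frequency dict and scanning its keys; objective: alternative algorithm (no speed claim).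

-- ===== PORT A =====
def checkif (boxId : String) : List Int :=
  let cs := boxId.toList
  -- for index in range(0, len(boxId)): build the frequency dict (boxId[index] is in range)
  let dic : PySem.Dict Char Int :=
    (PySem.List.pyRange 0 ((cs.length : Int)) 1).foldl
      (fun d index =>
        let c := PySem.List.pyGetD cs index ' '
        if d.contains c then d.insert c (d.getD c 0 + 1)
        else d.insert c 1)
      PySem.Dict.empty
  -- for x in dic: set the two flags
  let mn : Int × Int :=
    dic.keys.foldl
      (fun (mn : Int × Int) x =>
        if dic.getD x 0 = 2 then (1, mn.2)
        else if dic.getD x 0 = 3 then (mn.1, 1)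
        else mn)
      (0, 0)
  [mn.1, mn.2]

-- ===== PORT B =====
-- the inner `while run < len(s) and s[run] == s[0]: run += 1` loop: with s = c :: t it
-- computes run = 1 + runLen c t (the count of leading characters of t equal to c)
def runLen (c : Char) : List Char → Nat
  | [] => 0
  | x :: t => if x == c then 1 + runLen c t else 0

-- scan(s): flags of the first run combined with the recursive scan of s[run:]
-- (s[run:] with s = c :: t and run = 1 + runLen c t is t.drop (runLen c t))
def scanRuns : List Char → Int × Int
  | [] => (0, 0)
  | c :: t =>
    let run := 1 + runLen c t
    let p := scanRuns (t.drop (runLen c t))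
    (if run = 2 then 1 else p.1, if run = 3 then 1 else p.2)
termination_by l => l.length
decreasing_by
  simp only [List.length_cons, List.length_drop]
  omega

def checkif_alt (boxId : String) : List Int :=
  let p := scanRuns (PySem.List.sorted boxId.toList (fun c => c) false)
  [p.1, p.2]

-- ===== PRECONDITION & SPEC =====
def Spec_checkif (boxId : String) (out : List Int) : Prop := out = checkif_alt boxId
instance (boxId : String) (out : List Int) : Decidable (Spec_checkif boxId out) := by unfold Spec_checkif; infer_instance

-- ===== CLAIM (what is proved, stated in full; the proofs are below) =====
def Claim_equal_checkif : Prop := ∀ (boxId : String), Dom_checkif boxId → Spec_checkif boxId (checkif boxId)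

-- ===== LEMMAS AND PROOFS =====

-- A's frequency loop builds Counter(boxId)
lemma checkif_dic_eq_counter (cs : List Char) :
    (PySem.List.pyRange 0 ((cs.length : Int)) 1).foldl
      (fun (d : PySem.Dict Char Int) index =>
        let c := PySem.List.pyGetD cs index ' '
        if d.contains c then d.insert c (d.getD c 0 + 1)
        else d.insert c 1)
      PySem.Dict.empty = PySem.Dict.counter cs := by
  rw [PySem.List.foldl_pyRange_zero_pyGetD' cs ' '
    (fun (d : PySem.Dict Char Int) c =>
        if d.contains c then d.insert c (d.getD c 0 + 1) else d.insert c 1)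
    PySem.Dict.empty]
  rw [PySem.List.foldl_congr_mem' cs _ (fun (d : PySem.Dict Char Int) c => d.insert c (d.getD c 0 + 1))
    PySem.Dict.empty ?_]
  · exact PySem.Dict.foldl_insert_getD_add_one_eq_counter cs
  · intro c _ d
    by_cases h : d.contains c = true
    · simp [h]
    · simp only [Bool.not_eq_true] at h
      simp [h, PySem.Dict.getD_of_not_contains d 0 h]

-- A's flag loop computes "does some element satisfy p / (¬p ∧ q)"
lemma checkif_flag_foldl (p q : Char → Prop) [DecidablePred p] [DecidablePred q] :
    ∀ (l : List Char) (a b : Int),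
    l.foldl (fun (mn : Int × Int) x =>
        if p x then (1, mn.2) else if q x then (mn.1, 1) else mn) (a, b)
      = ((if ∃ x ∈ l, p x then 1 else a), (if ∃ x ∈ l, ¬ p x ∧ q x then 1 else b)) := by
  intro l
  induction l with
  | nil => intro a b; simp
  | cons x t ih =>
    intro a b
    by_cases hp : p x
    · simp [hp, ih]
    · by_cases hq : q x
      · simp [hp, hq, ih]
      · simp [hp, hq, ih]

lemma take_runLen (c : Char) (t : List Char) :
    t.take (runLen c t) = List.replicate (runLen c t) c := by
  induction t with
  | nil => simp [runLen]
  | cons x t ih =>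
    by_cases h : (x == c) = true
    · simp only [runLen, h, if_true]
      rw [Nat.add_comm, List.take_succ_cons, List.replicate_succ, ih, eq_of_beq h]
    · simp [runLen, h]

lemma not_mem_drop_runLen (c : Char) (t : List Char)
    (h : (c :: t).Pairwise (· ≤ ·)) : c ∉ t.drop (runLen c t) := by
  induction t with
  | nil => simp [runLen]
  | cons x t ih =>
    by_cases hx : (x == c) = true
    · have hc : x = c := eq_of_beq hx
      simp only [runLen, hx, if_true]
      rw [Nat.add_comm, List.drop_succ_cons]
      apply ih
      subst hc
      exact (List.pairwise_cons.1 h).2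
    · have hne : x ≠ c := fun e => hx (beq_iff_eq.2 e)
      rw [runLen, if_neg hx, List.drop_zero]
      intro hmem
      have hcx : c ≤ x := (List.pairwise_cons.1 h).1 x (List.mem_cons_self ..)
      have hclt : c < x := lt_of_le_of_ne hcx (Ne.symm hne)
      rcases List.mem_cons.1 hmem with rfl | hct
      · exact absurd rfl hne.symm
      · have hxp : (x :: t).Pairwise (· ≤ ·) := (List.pairwise_cons.1 h).2
        have : x ≤ c := (List.pairwise_cons.1 hxp).1 c hct
        exact absurd (lt_of_lt_of_le hclt this) (lt_irrefl c)

lemma count_eq_runLen (c : Char) (t : List Char)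
    (h : (c :: t).Pairwise (· ≤ ·)) : t.count c = runLen c t := by
  have hsplit := List.take_append_drop (runLen c t) t
  have hcnt : t.count c = (t.take (runLen c t)).count c + (t.drop (runLen c t)).count c := by
    conv_lhs => rw [← hsplit]
    exact List.count_append ..
  rw [take_runLen, List.count_replicate_self] at hcnt
  have h0 : (t.drop (runLen c t)).count c = 0 :=
    List.count_eq_zero.2 (not_mem_drop_runLen c t h)
  omega

lemma count_ne_eq_drop (c x : Char) (t : List Char) (hne : x ≠ c) :
    t.count x = (t.drop (runLen c t)).count x := by
  have hsplit := List.take_append_drop (runLen c t) t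
  have hcnt : t.count x = (t.take (runLen c t)).count x + (t.drop (runLen c t)).count x := by
    conv_lhs => rw [← hsplit]
    exact List.count_append ..
  rw [take_runLen, List.count_replicate] at hcnt
  rw [if_neg (fun e : (c == x) = true => hne (eq_of_beq e).symm)] at hcnt
  omega

-- on a sorted list, scanRuns returns the "some character occurs exactly 2 / 3 times" flags
lemma scanRuns_eq_aux (n : Nat) : ∀ (l : List Char), l.length ≤ n →
    l.Pairwise (· ≤ ·) →
    (scanRuns l).1 = (if ∃ x ∈ l, l.count x = 2 then 1 else 0) ∧
    (scanRuns l).2 = (if ∃ x ∈ l, l.count x = 3 then 1 else 0) := by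
  induction n with
  | zero =>
    intro l hl _
    have hnil : l = [] := List.eq_nil_of_length_eq_zero (Nat.le_zero.1 hl)
    subst hnil
    rw [scanRuns]; simp
  | succ n ihn =>
    intro l hl h
    match l with
    | [] => rw [scanRuns]; simp
    | c :: t =>
    have hrest : (t.drop (runLen c t)).Pairwise (· ≤ ·) :=
      h.sublist ((List.drop_sublist _ t).trans (List.sublist_cons_self c t))
    have hlen : (t.drop (runLen c t)).length ≤ n := by
      simp only [List.length_cons] at hl
      simp only [List.length_drop]
      omega
    obtain ⟨ih1, ih2⟩ := ihn (t.drop (runLen c t)) hlen hrest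
    have hcc : (c :: t).count c = 1 + runLen c t := by
      rw [List.count_cons_self, count_eq_runLen c t h]; omega
    have hcnotmem := not_mem_drop_runLen c t h
    have hiff : ∀ j : Nat, 1 ≤ j →
        ((∃ x ∈ c :: t, (c :: t).count x = j) ↔
          (1 + runLen c t = j ∨ ∃ x ∈ t.drop (runLen c t), (t.drop (runLen c t)).count x = j)) := by
      intro j hj
      constructor
      · rintro ⟨x, hmem, hcount⟩
        by_cases hx : x = c
        · subst hx; left; rw [← hcc]; exact hcount
        · right
          have hne2 : ¬ (c = x) := fun e => hx e.symm
          have hcx : (c :: t).count x = (t.drop (runLen c t)).count x := by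
            rw [List.count_cons]
            simp only [beq_iff_eq, hne2, if_false, Nat.add_zero]
            exact count_ne_eq_drop c x t hx
          refine ⟨x, ?_, by rw [← hcx]; exact hcount⟩
          have : 0 < (t.drop (runLen c t)).count x := by rw [← hcx, hcount]; omega
          exact List.count_pos_iff.1 this
      · rintro (hk | ⟨x, hmem, hcount⟩)
        · exact ⟨c, List.mem_cons_self .., by rw [hcc]; exact hk⟩
        · have hx : x ≠ c := fun e => hcnotmem (e ▸ hmem)
          have hne2 : ¬ (c = x) := fun e => hx e.symm
          refine ⟨x, List.mem_cons_of_mem c ((List.drop_sublist _ t).mem hmem), ?_⟩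
          rw [List.count_cons]
          simp only [beq_iff_eq, hne2, if_false, Nat.add_zero]
          rw [count_ne_eq_drop c x t hx]
          exact hcount
    have h2 := hiff 2 (by omega)
    have h3 := hiff 3 (by omega)
    have hstep1 : (scanRuns (c :: t)).1
        = if 1 + runLen c t = 2 then 1 else (scanRuns (t.drop (runLen c t))).1 := by
      rw [scanRuns]
    have hstep2 : (scanRuns (c :: t)).2
        = if 1 + runLen c t = 3 then 1 else (scanRuns (t.drop (runLen c t))).2 := by
      rw [scanRuns]
    constructor
    · rw [hstep1, ih1]
      by_cases hk : 1 + runLen c t = 2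
      · rw [if_pos hk, if_pos (h2.2 (Or.inl hk))]
      · rw [if_neg hk]
        by_cases he : ∃ x ∈ t.drop (runLen c t), (t.drop (runLen c t)).count x = 2
        · rw [if_pos he, if_pos (h2.2 (Or.inr he))]
        · rw [if_neg he, if_neg (fun hh => (h2.1 hh).elim hk he)]
    · rw [hstep2, ih2]
      by_cases hk : 1 + runLen c t = 3
      · rw [if_pos hk, if_pos (h3.2 (Or.inl hk))]
      · rw [if_neg hk]
        by_cases he : ∃ x ∈ t.drop (runLen c t), (t.drop (runLen c t)).count x = 3
        · rw [if_pos he, if_pos (h3.2 (Or.inr he))]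
        · rw [if_neg he, if_neg (fun hh => (h3.1 hh).elim hk he)]

-- on a sorted list, the scan's components are the "some char occurs exactly 2 / 3 times" flags
lemma scanRuns_fst (l : List Char) (h : l.Pairwise (· ≤ ·)) :
    (scanRuns l).1 = (if ∃ x ∈ l, l.count x = 2 then 1 else 0) :=
  (scanRuns_eq_aux l.length l (le_refl _) h).1

lemma scanRuns_snd (l : List Char) (h : l.Pairwise (· ≤ ·)) :
    (scanRuns l).2 = (if ∃ x ∈ l, l.count x = 3 then 1 else 0) :=
  (scanRuns_eq_aux l.length l (le_refl _) h).2

-- ===== VERDICT (by name: the statement is the Claim_ definition above) =====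
theorem checkif_spec : Claim_equal_checkif := by
  intro boxId _
  unfold Spec_checkif checkif checkif_alt
  dsimp only
  have hperm : (PySem.List.sorted boxId.toList (fun c => c) false).Perm boxId.toList :=
    PySem.List.sorted_perm ..
  have hsorted : (PySem.List.sorted boxId.toList (fun c => c) false).Pairwise (· ≤ ·) :=
    PySem.List.sorted_pairwise ..
  rw [scanRuns_fst _ hsorted, scanRuns_snd _ hsorted]
  simp only [checkif_dic_eq_counter, checkif_flag_foldl, PySem.Dict.keys_counter,
    PySem.Dict.getD_counter, List.cons.injEq, and_true]
  have hc2 : ∀ n : Nat, ((n : Int) = 2) ↔ n = 2 := fun n => by omega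
  have hc3 : ∀ n : Nat, ((n : Int) = 3) ↔ n = 3 := fun n => by omega
  constructor
  · apply if_congr _ rfl rfl
    simp only [PySem.Set.mem_ofList, hc2, hperm.mem_iff, hperm.count_eq]
  · apply if_congr _ rfl rfl
    simp only [PySem.Set.mem_ofList, hc2, hc3, hperm.mem_iff, hperm.count_eq]
    constructor
    · rintro ⟨x, hx, _, h3⟩; exact ⟨x, hx, h3⟩
    · rintro ⟨x, hx, h3⟩; exact ⟨x, hx, by omega, h3⟩
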